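-- pv_equiv track=rewrite | github.com/n1k0ver3E/Information-Retrieval-Encoding-Algorithm | GroupVarintEncodingandDecoding.py | encode_per_group
-- ===== SOURCE A (Python) =====
-- def encode_per_group(group):
--     encoded = list()
--     tags = 0
--     offset = 6
--     for i in range(len(group)):
--         temp = group[i]
--         count = 0x0
--         if(temp != 0):
--             current_byte = 0xFF
--             while(temp != 0):
--                  current_byte = current_byte & temp
--                  count = count + 1
--                  encoded.append(current_byte)
--                  temp = temp >> 8
--                  current_byte = 0xFF
--             tags = tags | (count-1 << offset)
--         else:
--             encoded.append(0x00)
--             tags = tags | (count << offset)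
--         offset -= 2
--     tag = tags
--     res = list()
--     res.append(tag)
--     temp = [bin(code)[2:].zfill(8)for code in encoded]
--     return res + encoded
-- ===== SOURCE B (Python) =====
-- # Same group-varint encoding, but: byte width computed in closed form from
-- # bit_length (zero naturally needs one byte), and the tag byte accumulated by
-- # shifting two bits per element instead of or-ing at a decreasing offset.
-- def _nbytes(x):
--     return max(1, (x.bit_length() + 7) // 8)
--
-- def encode_per_group(group):
--     encoded = []
--     tags = 0
--     for x in group:
--         n = _nbytes(x)
--         encoded += [(x >> (8 * k)) & 0xFF for k in range(n)]
--         tags = tags * 4 + (n - 1)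
--     return [tags << 2 * (4 - len(group))] + encoded
-- ===== Notes on version B (the rewrite author's own statement) =====
-- stated objective: simpler
-- what changed: B computes each value's byte width in closed form from bit_length (so the zero special-case branch and the 0xFF-masking sentinel loop disappear) and builds the tag by shifting an accumulator two bits per element instead of or-ing counts at a decreasing offset; the dead bin() line is dropped.
import Mathlib
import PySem

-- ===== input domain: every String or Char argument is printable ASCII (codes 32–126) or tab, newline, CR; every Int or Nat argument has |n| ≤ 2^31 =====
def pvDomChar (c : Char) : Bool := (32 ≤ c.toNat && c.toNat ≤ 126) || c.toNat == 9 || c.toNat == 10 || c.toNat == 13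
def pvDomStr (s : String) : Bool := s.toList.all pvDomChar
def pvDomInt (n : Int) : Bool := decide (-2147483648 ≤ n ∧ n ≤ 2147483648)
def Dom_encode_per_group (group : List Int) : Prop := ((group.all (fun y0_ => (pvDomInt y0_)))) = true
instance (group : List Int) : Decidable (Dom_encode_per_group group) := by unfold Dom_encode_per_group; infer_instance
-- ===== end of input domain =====

-- B computes each byte width in closed form from bit_length and shift-accumulates the
-- tag byte, instead of A's masking while-loop with a zero branch and a decreasing offset
-- (objective: simpler). Equal return value on Pre_ (≤ 4 non-negative ints).

-- ===== PORT A =====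
-- A's inner `while temp != 0` loop.  The fuel argument only guards termination: for
-- temp ≥ 0 (Pre_) the fuel `temp.natAbs + 1` is never exhausted; for temp < 0 the
-- Python loop diverges, which Pre_ excludes.  `0xFF & temp` is PySem.Int.band 255 temp
-- and `temp >> 8` is `temp >>> 8`, both Python-exact.
def pvLoopA : Nat → Int → Int → List Int → Int × List Int
  | 0, _, count, encoded => (count, encoded)
  | fuel + 1, temp, count, encoded =>
    if temp = 0 then (count, encoded)
    else pvLoopA fuel (temp >>> (8 : Nat)) (count + 1) (encoded ++ [PySem.Int.band 255 temp])

-- One iteration of A's `for i in range(len(group))` body, state = (encoded, tags, offset).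
-- `tags | (v << offset)` is ported as `tags + v * 2 ^ offset.toNat`: exact on Dom ∧ Pre_,
-- where each field v = count-1 < 4 lands in its own disjoint 2-bit slot (so | is +) and
-- offset ≥ 0 (Python raises ValueError on a negative shift, excluded by Pre_).
def pvStepA (s : List Int × Int × Int) (temp : Int) : List Int × Int × Int :=
  if temp ≠ 0 then
    let r := pvLoopA (temp.natAbs + 1) temp 0 s.1
    (r.2, s.2.1 + (r.1 - 1) * 2 ^ s.2.2.toNat, s.2.2 - 2)
  else
    (s.1 ++ [0], s.2.1 + 0 * 2 ^ s.2.2.toNat, s.2.2 - 2)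

def encode_per_group (group : List Int) : List Int :=
  let s := (PySem.List.pyRange 0 (group.length : Int) 1).foldl
      (fun s i => pvStepA s (PySem.List.pyGetD group i 0)) ([], 0, 6)
  -- `temp = [bin(code)[2:].zfill(8) for code in encoded]` is dead code (unused)
  [s.2.1] ++ s.1

-- ===== PORT B =====
-- Source B's _nbytes: max(1, (x.bit_length() + 7) // 8)  (arguments are ≥ 0 Nats, so // is /)
def pvNumBytes (x : Int) : Nat := max 1 ((PySem.Int.bitLength x + 7) / 8)

-- [(x >> (8*k)) & 0xFF for k in range(n)]
def pvBytes (x : Int) : List Int :=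
  (List.range (pvNumBytes x)).map (fun k : Nat => PySem.Int.band (x >>> (8 * k)) 255)

def pvStepB (s : List Int × Int) (x : Int) : List Int × Int :=
  (s.1 ++ pvBytes x, s.2 * 4 + ((pvNumBytes x : Int) - 1))

-- `tags << 2 * (4 - len(group))`: Nat subtraction; for len > 4 Python raises on the
-- negative shift, excluded by Pre_.
def encode_per_group_alt (group : List Int) : List Int :=
  let s := group.foldl pvStepB ([], 0)
  (s.2 <<< (2 * (4 - group.length))) :: s.1

-- ===== PRECONDITION & SPEC =====
-- Pre_ excludes exactly the inputs where A does not return: a group longer than 4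
-- makes the offset negative and `<<` raise ValueError, and a negative element makes
-- the arithmetic-shift while-loop diverge.
def Pre_encode_per_group (group : List Int) : Prop :=
  group.length ≤ 4 ∧ ∀ x ∈ group, 0 ≤ x
instance (group : List Int) : Decidable (Pre_encode_per_group group) := by
  unfold Pre_encode_per_group; infer_instance

def pvWitness_encode_per_group : List Int := [1, 300]

def Spec_encode_per_group (group : List Int) (out : List Int) : Prop :=
  out = encode_per_group_alt group
instance (group : List Int) (out : List Int) : Decidable (Spec_encode_per_group group out) := by
  unfold Spec_encode_per_group; infer_instance

-- ===== CLAIM (what is proved, stated in full; the proofs are below) =====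
def Claim_equal_encode_per_group : Prop := ∀ (group : List Int), Dom_encode_per_group group → Pre_encode_per_group group → Spec_encode_per_group group (encode_per_group group)

-- ===== LEMMAS AND PROOFS =====

theorem pvLoopA_zero (fuel : Nat) (c : Int) (enc : List Int) :
    pvLoopA fuel 0 c enc = (c, enc) := by
  cases fuel <;> simp [pvLoopA]

theorem pvCastShiftRight (a k : Nat) : ((a : Int) >>> (k : Nat)) = ((a >>> k : Nat) : Int) := by
  simp [Int.natCast_shiftRight]

theorem pvBitLength_lt (m : Nat) : m < 2 ^ PySem.Int.bitLength (m : Int) := by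
  have h := PySem.Int.lt_two_pow_bitLength (m : Int)
  simpa using h

theorem pvBitLength_le (m : Nat) (h : 1 ≤ m) :
    2 ^ (PySem.Int.bitLength (m : Int) - 1) ≤ m := by
  have h2 := PySem.Int.two_pow_bitLength_le (m : Int) (by exact_mod_cast Nat.one_le_iff_ne_zero.mp h)
  simpa using h2

theorem pvBitLength_pos (m : Nat) (h : 1 ≤ m) : 1 ≤ PySem.Int.bitLength (m : Int) := by
  rcases Nat.eq_zero_or_pos (PySem.Int.bitLength (m : Int)) with h0 | h1
  · have := pvBitLength_lt m
    rw [h0] at this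
    omega
  · omega

theorem pvNumBytes_small (m : Nat) (h1 : 1 ≤ m) (h2 : m < 256) : pvNumBytes (m : Int) = 1 := by
  have hlt := pvBitLength_lt m
  have hpos := pvBitLength_pos m h1
  set L := PySem.Int.bitLength (m : Int) with hL
  have hle : L ≤ 8 := by
    by_contra h
    push_neg at h
    have hle8 : (2 : Nat) ^ 8 ≤ 2 ^ (L - 1) := Nat.pow_le_pow_right (by norm_num) (by omega)
    have := pvBitLength_le m h1
    rw [← hL] at this
    omega
  unfold pvNumBytes
  rw [← hL]
  have : (L + 7) / 8 = 1 := by omega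
  rw [this]
  simp

theorem pvBitLength_ge9 (m : Nat) (h : 256 ≤ m) : 9 ≤ PySem.Int.bitLength (m : Int) := by
  have hlt := pvBitLength_lt m
  by_contra hc
  push_neg at hc
  have : (2 : Nat) ^ PySem.Int.bitLength (m : Int) ≤ 2 ^ 8 :=
    Nat.pow_le_pow_right (by norm_num) (by omega)
  omega

theorem pvBitLength_div (m : Nat) (h : 256 ≤ m) :
    PySem.Int.bitLength ((m / 256 : Nat) : Int) = PySem.Int.bitLength (m : Int) - 8 := by
  have hL9 := pvBitLength_ge9 m h
  have hlt := pvBitLength_lt m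
  have hle := pvBitLength_le m (by omega)
  set L := PySem.Int.bitLength (m : Int) with hL
  have hup : m / 256 < 2 ^ (L - 8) := by
    rw [Nat.div_lt_iff_lt_mul (by norm_num : 0 < 256)]
    have : 2 ^ (L - 8) * 256 = 2 ^ L := by
      have : (256 : Nat) = 2 ^ 8 := by norm_num
      rw [this, ← pow_add]
      congr 1
      omega
    omega
  have hlow : 2 ^ (L - 9) ≤ m / 256 := by
    rw [Nat.le_div_iff_mul_le (by norm_num : 0 < 256)]
    have : 2 ^ (L - 9) * 256 = 2 ^ (L - 1) := by
      have : (256 : Nat) = 2 ^ 8 := by norm_num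
      rw [this, ← pow_add]
      congr 1
      omega
    omega
  have hq1 : 1 ≤ m / 256 := by
    rw [Nat.le_div_iff_mul_le (by norm_num : 0 < 256)]
    omega
  have hltq := pvBitLength_lt (m / 256)
  have hleq := pvBitLength_le (m / 256) hq1
  set M := PySem.Int.bitLength ((m / 256 : Nat) : Int) with hM
  have hMpos := pvBitLength_pos (m / 256) hq1
  by_contra hc
  rcases Nat.lt_or_ge M (L - 8) with hlt' | hge'
  · have : (2 : Nat) ^ M ≤ 2 ^ (L - 9) := Nat.pow_le_pow_right (by norm_num) (by omega)
    omega
  · have hgt : L - 8 < M := by omega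
    have : (2 : Nat) ^ (L - 8) ≤ 2 ^ (M - 1) := Nat.pow_le_pow_right (by norm_num) (by omega)
    omega

theorem pvNumBytes_div (m : Nat) (h : 256 ≤ m) :
    pvNumBytes (m : Int) = pvNumBytes ((m / 256 : Nat) : Int) + 1 := by
  have hL9 := pvBitLength_ge9 m h
  unfold pvNumBytes
  rw [pvBitLength_div m h]
  set L := PySem.Int.bitLength (m : Int) with hL
  have e1 : max 1 ((L + 7) / 8) = (L + 7) / 8 := by
    have : 2 ≤ (L + 7) / 8 := by omega
    omega
  have e2 : max 1 ((L - 8 + 7) / 8) = (L - 8 + 7) / 8 := by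
    have : 1 ≤ (L - 8 + 7) / 8 := by omega
    omega
  rw [e1, e2]
  omega

theorem pvShift_div (m k : Nat) :
    ((m : Int) >>> (8 * (k + 1)) : Int) = (((m / 256 : Nat) : Int) >>> (8 * k)) := by
  rw [pvCastShiftRight, pvCastShiftRight]
  congr 1
  rw [Nat.shiftRight_eq_div_pow, Nat.shiftRight_eq_div_pow, Nat.div_div_eq_div_mul]
  congr 1
  have : (256 : Nat) = 2 ^ 8 := by norm_num
  rw [this, ← pow_add]
  congr 1
  omega

theorem pvBytes_small (m : Nat) (h1 : 1 ≤ m) (h2 : m < 256) :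
    pvBytes (m : Int) = [PySem.Int.band 255 (m : Int)] := by
  unfold pvBytes
  rw [pvNumBytes_small m h1 h2]
  show [PySem.Int.band ((m : Int) >>> (0 : Nat)) 255] = [PySem.Int.band 255 (m : Int)]
  rw [pvCastShiftRight, Nat.shiftRight_zero, PySem.Int.band_comm]

theorem pvBytes_div (m : Nat) (h : 256 ≤ m) :
    pvBytes (m : Int) = PySem.Int.band 255 (m : Int) :: pvBytes ((m / 256 : Nat) : Int) := by
  unfold pvBytes
  rw [pvNumBytes_div m h, List.range_succ_eq_map, List.map_cons, List.map_map]
  congr 1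
  · show PySem.Int.band ((m : Int) >>> (0 : Nat)) 255 = _
    rw [pvCastShiftRight, Nat.shiftRight_zero, PySem.Int.band_comm]
  · apply List.map_congr_left
    intro k _
    show PySem.Int.band ((m : Int) >>> (8 * (k + 1))) 255 = _
    rw [pvShift_div m k]

theorem pvLoopA_eq (m : Nat) : ∀ (_ : 1 ≤ m) (fuel : Nat) (_ : m ≤ fuel) (c : Int) (enc : List Int),
    pvLoopA fuel (m : Int) c enc = (c + (pvNumBytes (m : Int) : Int), enc ++ pvBytes (m : Int)) := by
  induction m using Nat.strong_induction_on with
  | _ m IH =>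
    intro hm fuel hf c enc
    obtain ⟨f, rfl⟩ : ∃ f, fuel = f + 1 := ⟨fuel - 1, by omega⟩
    have hne : (m : Int) ≠ 0 := by exact_mod_cast Nat.one_le_iff_ne_zero.mp hm
    rw [pvLoopA, if_neg hne]
    have hsh : ((m : Int) >>> (8 : Nat)) = ((m / 256 : Nat) : Int) := by
      rw [pvCastShiftRight]
      congr 1
      rw [Nat.shiftRight_eq_div_pow]
      try norm_num
    rcases Nat.lt_or_ge m 256 with hlt | hge
    · have hq : m / 256 = 0 := Nat.div_eq_of_lt hlt
      rw [hsh, hq]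
      simp only [Nat.cast_zero]
      rw [pvLoopA_zero]
      rw [pvNumBytes_small m hm hlt, pvBytes_small m hm hlt]
      norm_num
    · have hq1 : 1 ≤ m / 256 := by
        rw [Nat.le_div_iff_mul_le (by norm_num : 0 < 256)]
        omega
      have hdlt : m / 256 < m := Nat.div_lt_self (by omega) (by norm_num)
      have hff : m / 256 ≤ f := by omega
      rw [hsh, IH (m / 256) hdlt hq1 f hff]
      rw [pvNumBytes_div m hge, pvBytes_div m hge, Prod.mk.injEq]
      constructor
      · push_cast
        ring
      · simp

theorem pvNumBytes_zero : pvNumBytes (0 : Int) = 1 := by decide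

theorem pvBytes_zero : pvBytes (0 : Int) = [0] := by decide

theorem pvStepA_eq (enc : List Int) (t off x : Int) (hx : 0 ≤ x) (_hoff : 0 ≤ off) :
    pvStepA (enc, t, off) x
      = (enc ++ pvBytes x, t + ((pvNumBytes x : Int) - 1) * 2 ^ off.toNat, off - 2) := by
  rcases eq_or_lt_of_le hx with h0 | hpos
  · rw [← h0]
    unfold pvStepA
    rw [if_neg (by simp)]
    rw [pvNumBytes_zero, pvBytes_zero]
    norm_num
  · have hne : x ≠ 0 := by omega
    obtain ⟨m, rfl⟩ : ∃ m : Nat, x = (m : Int) := ⟨x.toNat, by omega⟩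
    have hm : 1 ≤ m := by exact_mod_cast hpos
    unfold pvStepA
    rw [if_pos hne]
    have hfuel : m ≤ (m : Int).natAbs + 1 := by simp
    rw [pvLoopA_eq m hm ((m : Int).natAbs + 1) hfuel 0 enc]
    simp

theorem pvFoldRel : ∀ (gs : List Int) (enc : List Int) (tB off : Int),
    2 * (gs.length : Int) ≤ off + 2 → 0 ≤ off + 2 → (∀ x ∈ gs, 0 ≤ x) →
    gs.foldl pvStepA (enc, tB * 2 ^ (off + 2).toNat, off)
      = ((gs.foldl pvStepB (enc, tB)).1,
         (gs.foldl pvStepB (enc, tB)).2 * 2 ^ ((off + 2) - 2 * gs.length).toNat,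
         off - 2 * gs.length) := by
  intro gs
  induction gs with
  | nil => intro enc tB off h1 h2 h3; simp
  | cons x gs IH =>
    intro enc tB off h1 h2 h3
    have hlen : (0 : Int) ≤ (gs.length : Int) := by positivity
    have hoff : 0 ≤ off := by
      simp only [List.length_cons] at h1
      push_cast at h1
      omega
    have hx : 0 ≤ x := h3 x (by simp)
    rw [List.foldl_cons, pvStepA_eq enc _ off x hx hoff]
    have htag : tB * 2 ^ (off + 2).toNat + ((pvNumBytes x : Int) - 1) * 2 ^ off.toNat
        = (tB * 4 + ((pvNumBytes x : Int) - 1)) * 2 ^ (off - 2 + 2).toNat := by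
      have e1 : (off + 2).toNat = off.toNat + 2 := by omega
      have e2 : (off - 2 + 2).toNat = off.toNat := by omega
      rw [e1, e2, pow_add]
      ring
    rw [htag]
    rw [IH (enc ++ pvBytes x) (tB * 4 + ((pvNumBytes x : Int) - 1)) (off - 2)
        (by simp only [List.length_cons] at h1; push_cast at h1 ⊢; omega)
        (by omega)
        (fun y hy => h3 y (List.mem_cons_of_mem x hy))]
    have hfold : gs.foldl pvStepB (enc ++ pvBytes x, tB * 4 + ((pvNumBytes x : Int) - 1))
        = (x :: gs).foldl pvStepB (enc, tB) := by
      rw [List.foldl_cons]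
      rfl
    rw [hfold]
    have e3 : (off - 2 + 2 - 2 * (gs.length : Int)).toNat
        = (off + 2 - 2 * ((x :: gs).length : Int)).toNat := by
      simp only [List.length_cons]
      push_cast
      omega
    have e4 : off - 2 - 2 * (gs.length : Int) = off - 2 * ((x :: gs).length : Int) := by
      simp only [List.length_cons]
      push_cast
      ring
    rw [e3, e4]

-- ===== VERDICT (by name: the statement is the Claim_ definition above) =====
theorem encode_per_group_spec : Claim_equal_encode_per_group := by
  intro group _hdom hpre
  unfold Spec_encode_per_group encode_per_group encode_per_group_alt
  rw [PySem.List.foldl_pyRange_zero_pyGetD' group 0 pvStepA ([], 0, 6)]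
  obtain ⟨hlen, hpos⟩ := hpre
  have h := pvFoldRel group [] 0 6 (by push_cast; omega) (by norm_num) hpos
  norm_num at h
  rw [h]
  have e : ((8 : Int) - 2 * (group.length : Int)).toNat = 2 * (4 - group.length) := by
    omega
  simp only [Int.shiftLeft_eq, e]
  simp
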